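-- pv_equiv track=rewrite | github.com/jjoshua2/arc_agi | unsolved/2025-10-02T21-13-22Z/e73095fd_best2.py | transform
-- ===== SOURCE A (Python) =====
-- from collections import deque
--
-- def transform(grid: list[list[int]]) -> list[list[int]]:
--     if not grid or not grid[0]:
--         return []
--     h = len(grid)
--     w = len(grid[0])
--     visited = [[False] * w for _ in range(h)]
--     queue = deque()
--     directions = [(0, 1), (0, -1), (1, 0), (-1, 0)]
--
--     # Start flood fill from top and bottom 0s
--     for c in range(w):
--         if grid[0][c] == 0 and not visited[0][c]:
--             visited[0][c] = True
--             queue.append((0, c))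
--         if grid[h-1][c] == 0 and not visited[h-1][c]:
--             visited[h-1][c] = True
--             queue.append((h-1, c))
--
--     while queue:
--         r, c = queue.popleft()
--         for dr, dc in directions:
--             nr, nc = r + dr, c + dc
--             if 0 <= nr < h and 0 <= nc < w and not visited[nr][nc] and grid[nr][nc] == 0:
--                 visited[nr][nc] = True
--                 queue.append((nr, nc))
--
--     # Create output, fill unreached 0s with 4
--     output = [row[:] for row in grid]
--     for r in range(h):
--         for c in range(w):
--             if grid[r][c] == 0 and not visited[r][c]:
--                 output[r][c] = 4
--
--     return output
-- ===== SOURCE B (Python) =====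
-- def transform(grid: list[list[int]]) -> list[list[int]]:
--     if not grid or not grid[0]:
--         return []
--     h = len(grid)
--     w = len(grid[0])
--     # seed: zeros of the top and bottom rows
--     vis = set()
--     for c in range(w):
--         if grid[0][c] == 0:
--             vis.add((0, c))
--         if grid[h - 1][c] == 0:
--             vis.add((h - 1, c))
--     # saturate: repeatedly add every zero cell adjacent to the current set
--     for _ in range(h * w):
--         new = vis | {(r, c) for r in range(h) for c in range(w)
--                      if grid[r][c] == 0
--                      and ((r + 1, c) in vis or (r - 1, c) in vis
--                           or (r, c + 1) in vis or (r, c - 1) in vis)}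
--         if new == vis:
--             break
--         vis = new
--     return [[4 if j < w and cell == 0 and (i, j) not in vis else cell
--              for j, cell in enumerate(row)]
--             for i, row in enumerate(grid)]
-- ===== Notes on version B (the rewrite author's own statement) =====
-- stated objective: alternative
-- what changed: A's queue-based BFS flood fill with a mutable visited matrix is replaced by a round-based fixed-point saturation of a set of border-connected zero cells (each round adds every zero cell adjacent to the current set, stopping when the set no longer changes), with the output built by a nested comprehension instead of in-place mutation.
import Mathlib
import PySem

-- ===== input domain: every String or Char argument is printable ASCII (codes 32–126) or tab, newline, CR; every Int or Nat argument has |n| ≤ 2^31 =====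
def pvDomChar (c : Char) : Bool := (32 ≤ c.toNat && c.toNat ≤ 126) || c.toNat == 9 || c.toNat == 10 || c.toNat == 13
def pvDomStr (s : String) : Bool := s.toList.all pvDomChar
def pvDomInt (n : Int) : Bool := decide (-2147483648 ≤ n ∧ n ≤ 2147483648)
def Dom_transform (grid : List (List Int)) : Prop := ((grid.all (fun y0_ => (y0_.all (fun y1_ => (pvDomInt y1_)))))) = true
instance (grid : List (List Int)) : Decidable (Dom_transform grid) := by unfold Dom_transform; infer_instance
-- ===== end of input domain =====

-- B replaces A's queue-based flood fill by a round-based saturation of a set of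
-- border-connected zero cells (fixed-point iteration, no queue, no visited matrix);
-- objective: alternative (not faster).

-- ===== PORT A =====
-- grid[r][c] (indices guarded non-negative & in range at every use site, so pyGetD is exact)
def pvAget (grid : List (List Int)) (r c : Int) : Int :=
  PySem.List.pyGetD (PySem.List.pyGetD grid r []) c 0

-- visited[r][c]
def pvVget (v : List (List Bool)) (r c : Int) : Bool :=
  PySem.List.pyGetD (PySem.List.pyGetD v r []) c false

-- visited[r][c] = True
def pvVset (v : List (List Bool)) (r c : Int) : List (List Bool) :=
  PySem.List.pySetD v r (PySem.List.pySetD (PySem.List.pyGetD v r []) c true)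

def pvDirs : List (Int × Int) := [(0, 1), (0, -1), (1, 0), (-1, 0)]

-- body of 'for dr, dc in directions: …'
def pvStepA (grid : List (List Int)) (h w r c : Int)
    (s : List (List Bool) × List (Int × Int)) (d : Int × Int) :
    List (List Bool) × List (Int × Int) :=
  let nr := r + d.1
  let nc := c + d.2
  if 0 ≤ nr ∧ nr < h ∧ 0 ≤ nc ∧ nc < w ∧ pvVget s.1 nr nc = false ∧ pvAget grid nr nc = 0 then
    (pvVset s.1 nr nc, s.2 ++ [(nr, nc)])
  else s

-- 'while queue: …' — fuel-counted; the fuel transform passes provably never runs out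
-- (measure 2·#unvisited + |queue| strictly decreases, see the lemmas below)
def pvBfs (grid : List (List Int)) (h w : Int) :
    Nat → List (List Bool) → List (Int × Int) → List (List Bool)
  | _, v, [] => v
  | 0, v, _ :: _ => v
  | Nat.succ n, v, (r, c) :: q =>
      let s := pvDirs.foldl (pvStepA grid h w r c) (v, q)
      pvBfs grid h w n s.1 s.2

-- body of the seeding loop 'for c in range(w): …'
def pvSeedA (grid : List (List Int)) (h : Int)
    (s : List (List Bool) × List (Int × Int)) (c : Int) :
    List (List Bool) × List (Int × Int) :=
  let s1 := if pvAget grid 0 c = 0 ∧ pvVget s.1 0 c = false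
            then (pvVset s.1 0 c, s.2 ++ [((0 : Int), c)]) else s
  if pvAget grid (h - 1) c = 0 ∧ pvVget s1.1 (h - 1) c = false
  then (pvVset s1.1 (h - 1) c, s1.2 ++ [(h - 1, c)]) else s1

-- 'output = [row[:] for row in grid]' then the final double loop
def pvFinalA (grid : List (List Int)) (h w : Int) (vis : List (List Bool)) : List (List Int) :=
  (PySem.List.pyRange 0 h 1).foldl (fun out r =>
    (PySem.List.pyRange 0 w 1).foldl (fun out c =>
      if pvAget grid r c = 0 ∧ pvVget vis r c = false then
        PySem.List.pySetD out r (PySem.List.pySetD (PySem.List.pyGetD out r []) c 4)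
      else out) out) (grid.map (fun row => row))

def transform (grid : List (List Int)) : List (List Int) :=
  if grid = [] ∨ grid.headD [] = [] then []
  else
    let h : Int := (grid.length : Int)
    let w : Int := ((grid.headD []).length : Int)
    let v0 : List (List Bool) :=
      List.replicate grid.length (List.replicate (grid.headD []).length false)
    let s0 := (PySem.List.pyRange 0 w 1).foldl (pvSeedA grid h) (v0, [])
    let vis := pvBfs grid h w
      (2 * (grid.length * (grid.headD []).length) + 2 * (grid.headD []).length) s0.1 s0.2
    pvFinalA grid h w vis

-- ===== PORT B =====
-- seeding loop: zeros of the top and bottom rows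
def pvSeedB (grid : List (List Int)) (h w : Int) : PySem.Set (Int × Int) :=
  (PySem.List.pyRange 0 w 1).foldl (fun s c =>
    let s1 := if PySem.List.pyGetD (PySem.List.pyGetD grid 0 []) c 0 = 0
              then PySem.Set.add s ((0 : Int), c) else s
    if PySem.List.pyGetD (PySem.List.pyGetD grid (h - 1) []) c 0 = 0
    then PySem.Set.add s1 (h - 1, c) else s1) []

-- 'new = vis | {(r,c) … if grid[r][c]==0 and a neighbour is in vis}'
def pvGrow (grid : List (List Int)) (h w : Int) (vis : PySem.Set (Int × Int)) :
    PySem.Set (Int × Int) :=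
  (PySem.List.pyRange 0 h 1).foldl (fun acc r =>
    (PySem.List.pyRange 0 w 1).foldl (fun acc c =>
      if PySem.List.pyGetD (PySem.List.pyGetD grid r []) c 0 = 0 ∧
          ((r + 1, c) ∈ vis ∨ (r - 1, c) ∈ vis ∨ (r, c + 1) ∈ vis ∨ (r, c - 1) ∈ vis) then
        PySem.Set.add acc (r, c)
      else acc) acc) vis

-- 'for _ in range(h*w): … if new == vis: break; vis = new'
def pvLoopB (grid : List (List Int)) (h w : Int) :
    Nat → PySem.Set (Int × Int) → PySem.Set (Int × Int)
  | 0, vis => vis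
  | Nat.succ n, vis =>
      let new := pvGrow grid h w vis
      if PySem.Set.equal new vis then vis else pvLoopB grid h w n new

def transform_alt (grid : List (List Int)) : List (List Int) :=
  if grid = [] ∨ grid.headD [] = [] then []
  else
    let h : Int := (grid.length : Int)
    let w : Int := ((grid.headD []).length : Int)
    let vis := pvLoopB grid h w (grid.length * (grid.headD []).length) (pvSeedB grid h w)
    (PySem.List.enumerate grid).map (fun p =>
      (PySem.List.enumerate p.2).map (fun q =>
        if q.1 < w ∧ q.2 = 0 ∧ ¬((p.1, q.1) ∈ vis) then (4 : Int) else q.2))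

-- ===== PRECONDITION & SPEC =====
-- Pre_ excludes exactly the ragged grids on which A raises IndexError
-- (a row shorter than the first row; A indexes every row up to len(grid[0])).
def Pre_transform (grid : List (List Int)) : Prop :=
  ∀ row ∈ grid, (grid.headD []).length ≤ row.length

instance (grid : List (List Int)) : Decidable (Pre_transform grid) := by
  unfold Pre_transform; infer_instance

def pvWitness_transform : List (List Int) := [[0, 1], [1, 0]]

def Spec_transform (grid : List (List Int)) (out : List (List Int)) : Prop := out = transform_alt grid
instance (grid : List (List Int)) (out : List (List Int)) : Decidable (Spec_transform grid out) := by
  unfold Spec_transform; infer_instance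

-- ===== CLAIM (what is proved, stated in full; the proofs are below) =====
def Claim_equal_transform : Prop :=
  ∀ (grid : List (List Int)), Dom_transform grid → Pre_transform grid →
    Spec_transform grid (transform grid)

-- ===== LEMMAS AND PROOFS =====



structure pvCtx : Type where
  grid : List (List Int)
  hrows : ∀ row ∈ grid, (grid.headD []).length ≤ row.length
  hne : grid ≠ []
  hne0 : grid.headD [] ≠ []

def pvCtx.h (C : pvCtx) : Int := (C.grid.length : Int)
def pvCtx.w (C : pvCtx) : Int := ((C.grid.headD []).length : Int)
def pvCtx.g (C : pvCtx) (r c : Int) : Int := pvAget C.grid r c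
def pvCtx.InR (C : pvCtx) (p : Int × Int) : Prop :=
  0 ≤ p.1 ∧ p.1 < C.h ∧ 0 ≤ p.2 ∧ p.2 < C.w

lemma pvCtx.h_pos (C : pvCtx) : 0 < C.h := by
  unfold pvCtx.h; exact_mod_cast List.length_pos_iff.mpr C.hne

def pvW (C : pvCtx) : PySem.Set (Int × Int) :=
  pvLoopB C.grid C.h C.w (C.grid.length * (C.grid.headD []).length) (pvSeedB C.grid C.h C.w)

def pvShape (C : pvCtx) (v : List (List Bool)) : Prop :=
  v.length = C.grid.length ∧ ∀ row ∈ v, row.length = (C.grid.headD []).length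

def pvCnt (v : List (List Bool)) : Nat := (v.map (fun row => row.count false)).sum

-- ---------- access lemmas ----------

theorem sum_set_nat : ∀ (xs : List Nat) (n v : Nat), (h : n < xs.length) → (xs.set n v).sum + xs[n] = xs.sum + v := by
  intro xs
  induction xs with
  | nil => intro n v h; simp at h
  | cons x xs ih =>
    intro n v h
    cases n with
    | zero => simp [List.set]; omega
    | succ m =>
      have hm : m < xs.length := by simpa using h
      have := ih m v hm
      simp [List.set]
      omega

theorem count_set_false : ∀ (xs : List Bool) (n : Nat), (h : n < xs.length) → xs[n] = false →
    (xs.set n true).count false + 1 = xs.count false := by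
  intro xs
  induction xs with
  | nil => intro n h; simp at h
  | cons x xs ih =>
    intro n h hb
    cases n with
    | zero =>
      simp at hb
      simp [List.set, hb]
    | succ m =>
      have hm : m < xs.length := by simpa using h
      have hb' : xs[m] = false := by simpa using hb
      have := ih m hm hb'
      simp [List.set, List.count_cons]
      omega

lemma vget_eq (v : List (List Bool)) {r c : Int} (hr : 0 ≤ r) (hc : 0 ≤ c) :
    pvVget v r c = (v.getD r.toNat []).getD c.toNat false := by
  rw [pvVget, PySem.List.pyGetD_of_nonneg _ _ hr, PySem.List.pyGetD_of_nonneg _ _ hc]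

lemma vset_eq (v : List (List Bool)) {r c : Int} (hr : 0 ≤ r) (hc : 0 ≤ c) :
    pvVset v r c = v.set r.toNat ((v.getD r.toNat []).set c.toNat true) := by
  rw [pvVset, PySem.List.pyGetD_of_nonneg _ _ hr,
    PySem.List.pySetD_of_nonneg _ _ hc, PySem.List.pySetD_of_nonneg _ _ hr]

lemma toNat_lt_of_InR_left (C : pvCtx) {p : Int × Int} (hp : C.InR p) :
    p.1.toNat < C.grid.length := by
  obtain ⟨h1, h2, h3, h4⟩ := hp
  unfold pvCtx.h at h2; omega

lemma toNat_lt_of_InR_right (C : pvCtx) {p : Int × Int} (hp : C.InR p) :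
    p.2.toNat < (C.grid.headD []).length := by
  obtain ⟨h1, h2, h3, h4⟩ := hp
  unfold pvCtx.w at h4; omega

lemma row_len_of_shape (C : pvCtx) {v : List (List Bool)} (hs : pvShape C v)
    {r : Nat} (hr : r < C.grid.length) :
    (v.getD r []).length = (C.grid.headD []).length := by
  have hrl : r < v.length := by rw [hs.1]; exact hr
  have : v.getD r [] = v[r] := by simp [List.getD_eq_getElem?_getD, hrl]
  rw [this]
  exact hs.2 _ (List.getElem_mem _)

lemma shape_vset (C : pvCtx) {v : List (List Bool)} {p : Int × Int}
    (hs : pvShape C v) (hp : C.InR p) : pvShape C (pvVset v p.1 p.2) := by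
  rw [vset_eq v hp.1 hp.2.2.1]
  constructor
  · simp [hs.1]
  · intro row hrow
    rcases List.mem_or_eq_of_mem_set hrow with h | h
    · exact hs.2 _ h
    · subst h
      simp only [List.length_set]
      exact row_len_of_shape C hs (toNat_lt_of_InR_left C hp)

lemma vget_vset (C : pvCtx) {v : List (List Bool)} {p : Int × Int}
    (hs : pvShape C v) (hp : C.InR p) {r c : Int} (hr : 0 ≤ r) (hc : 0 ≤ c) :
    pvVget (pvVset v p.1 p.2) r c = if (r, c) = p then true else pvVget v r c := by
  have hrN := toNat_lt_of_InR_left C hp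
  have hcN := toNat_lt_of_InR_right C hp
  have hrl : p.1.toNat < v.length := by rw [hs.1]; exact hrN
  have hcl : p.2.toNat < (v.getD p.1.toNat []).length := by
    rw [row_len_of_shape C hs hrN]; exact hcN
  rw [vget_eq _ hr hc, vset_eq v hp.1 hp.2.2.1]
  by_cases hpe : (r, c) = p
  · rw [if_pos hpe]
    have h1 : r = p.1 := congrArg Prod.fst hpe
    have h2 : c = p.2 := congrArg Prod.snd hpe
    rw [h1, h2]
    have hrow : (v.set p.1.toNat ((v.getD p.1.toNat []).set p.2.toNat true)).getD p.1.toNat [] =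
        (v.getD p.1.toNat []).set p.2.toNat true := by
      simp [List.getD_eq_getElem?_getD, hrl]
    rw [hrow]
    simp only [List.getD_eq_getElem?_getD] at hcl ⊢
    simp [hcl]
  · rw [if_neg hpe, vget_eq _ hr hc]
    by_cases hre : r.toNat = p.1.toNat
    · have hre' : r = p.1 := by
        have hp1 : 0 ≤ p.1 := hp.1
        omega
      have hce : c ≠ p.2 := by
        intro hce; exact hpe (by rw [hre', hce])
      have hceN : c.toNat ≠ p.2.toNat := by
        have hp2 : 0 ≤ p.2 := hp.2.2.1
        omega
      have : (v.set p.1.toNat ((v.getD p.1.toNat []).set p.2.toNat true)).getD r.toNat [] =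
          (v.getD p.1.toNat []).set p.2.toNat true := by
        simp [List.getD_eq_getElem?_getD, hre, hrl]
      rw [this, hre']
      simp [List.getD_eq_getElem?_getD, List.getElem?_set_ne (Ne.symm hceN)]
    · have : (v.set p.1.toNat ((v.getD p.1.toNat []).set p.2.toNat true)).getD r.toNat [] =
          v.getD r.toNat [] := by
        simp [List.getD_eq_getElem?_getD, List.getElem?_set_ne (Ne.symm hre)]
      rw [this]

lemma cnt_vset (C : pvCtx) {v : List (List Bool)} {p : Int × Int}
    (hs : pvShape C v) (hp : C.InR p) (hf : pvVget v p.1 p.2 = false) :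
    pvCnt (pvVset v p.1 p.2) + 1 = pvCnt v := by
  have hrN := toNat_lt_of_InR_left C hp
  have hcN := toNat_lt_of_InR_right C hp
  have hrl : p.1.toNat < v.length := by rw [hs.1]; exact hrN
  have hcl : p.2.toNat < (v.getD p.1.toNat []).length := by
    rw [row_len_of_shape C hs hrN]; exact hcN
  rw [vget_eq _ hp.1 hp.2.2.1] at hf
  have hentry : (v.getD p.1.toNat [])[p.2.toNat]'hcl = false := by
    rw [← hf]
    exact (List.getD_eq_getElem _ _ hcl).symm
  rw [pvCnt, vset_eq v hp.1 hp.2.2.1, List.map_set]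
  have hml : p.1.toNat < (v.map (fun row => row.count false)).length := by
    simpa using hrl
  have hsum := sum_set_nat (v.map (fun row => row.count false)) p.1.toNat
    (((v.getD p.1.toNat []).set p.2.toNat true).count false) hml
  have hget : (v.map (fun row => row.count false))[p.1.toNat] = (v.getD p.1.toNat []).count false := by
    simp [List.getD_eq_getElem?_getD, hrl]
  rw [hget] at hsum
  have hcount := count_set_false (v.getD p.1.toNat []) p.2.toNat hcl hentry
  unfold pvCnt
  omega

-- ---------- generic fold lemmas ----------

lemma mem_foldl_iff {α β : Type} (f : List α → β → List α) (P : β → α → Prop) (y : α)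
    (hf : ∀ s b, y ∈ f s b ↔ y ∈ s ∨ P b y) :
    ∀ (l : List β) (s : List α), y ∈ l.foldl f s ↔ y ∈ s ∨ ∃ b ∈ l, P b y := by
  intro l
  induction l with
  | nil => simp
  | cons b l ih =>
    intro s
    rw [List.foldl_cons, ih, hf]
    constructor
    · rintro ((h | h) | ⟨b', hb', h⟩)
      · exact Or.inl h
      · exact Or.inr ⟨b, List.mem_cons_self, h⟩
      · exact Or.inr ⟨b', List.mem_cons_of_mem _ hb', h⟩
    · rintro (h | ⟨b', hb', h⟩)
      · exact Or.inl (Or.inl h)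
      · rcases List.mem_cons.mp hb' with rfl | hb'
        · exact Or.inl (Or.inr h)
        · exact Or.inr ⟨b', hb', h⟩

lemma foldl_extends {α β : Type} (f : List α → β → List α)
    (hf : ∀ s b, ∃ t, f s b = s ++ t) :
    ∀ (l : List β) (s : List α), ∃ t, l.foldl f s = s ++ t := by
  intro l
  induction l with
  | nil => exact fun s => ⟨[], by simp⟩
  | cons b l ih =>
    intro s
    obtain ⟨t1, ht1⟩ := hf s b
    obtain ⟨t2, ht2⟩ := ih (f s b)
    exact ⟨t1 ++ t2, by rw [List.foldl_cons, ht2, ht1, List.append_assoc]⟩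

lemma nodup_foldl {α β : Type} (f : List α → β → List α)
    (hf : ∀ s b, s.Nodup → (f s b).Nodup) :
    ∀ (l : List β) (s : List α), s.Nodup → (l.foldl f s).Nodup := by
  intro l
  induction l with
  | nil => exact fun s h => h
  | cons b l ih => exact fun s h => ih _ (hf s b h)

-- ---------- B-side lemmas ----------

lemma mem_seedB (C : pvCtx) (y : Int × Int) :
    y ∈ pvSeedB C.grid C.h C.w ↔
      ∃ c : Int, 0 ≤ c ∧ c < C.w ∧
        ((y = (0, c) ∧ C.g 0 c = 0) ∨ (y = (C.h - 1, c) ∧ C.g (C.h - 1) c = 0)) := by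
  have hstep : ∀ (s : PySem.Set (Int × Int)) (c : Int),
      y ∈ (fun (s : PySem.Set (Int × Int)) (c : Int) =>
        let s1 := if PySem.List.pyGetD (PySem.List.pyGetD C.grid 0 []) c 0 = 0
                  then PySem.Set.add s ((0 : Int), c) else s
        if PySem.List.pyGetD (PySem.List.pyGetD C.grid (C.h - 1) []) c 0 = 0
        then PySem.Set.add s1 (C.h - 1, c) else s1) s c ↔
      y ∈ s ∨ ((y = ((0 : Int), c) ∧ C.g 0 c = 0) ∨ (y = (C.h - 1, c) ∧ C.g (C.h - 1) c = 0)) := by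
    intro s c
    simp only [pvCtx.g, pvAget, pvAget]
    split_ifs with h1 h2 h2 <;>
      simp [PySem.Set.mem_add, h1, h2] <;> tauto
  rw [pvSeedB, mem_foldl_iff _ (fun (c : Int) (z : Int × Int) =>
    (z = ((0 : Int), c) ∧ C.g 0 c = 0) ∨ (z = (C.h - 1, c) ∧ C.g (C.h - 1) c = 0)) y hstep]
  simp [PySem.List.mem_pyRange_one]
  constructor
  · rintro ⟨c, ⟨hc1, hc2⟩, h⟩
    exact ⟨c, hc1, hc2, h⟩
  · rintro ⟨c, hc1, hc2, h⟩
    exact ⟨c, ⟨hc1, hc2⟩, h⟩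

lemma mem_grow (C : pvCtx) (vis : PySem.Set (Int × Int)) (y : Int × Int) :
    y ∈ pvGrow C.grid C.h C.w vis ↔
      y ∈ vis ∨ (C.InR y ∧ C.g y.1 y.2 = 0 ∧
        ((y.1 + 1, y.2) ∈ vis ∨ (y.1 - 1, y.2) ∈ vis ∨
         (y.1, y.2 + 1) ∈ vis ∨ (y.1, y.2 - 1) ∈ vis)) := by
  have hinner : ∀ (r : Int) (acc : PySem.Set (Int × Int)),
      y ∈ (PySem.List.pyRange 0 C.w 1).foldl (fun acc c =>
        if PySem.List.pyGetD (PySem.List.pyGetD C.grid r []) c 0 = 0 ∧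
            ((r + 1, c) ∈ vis ∨ (r - 1, c) ∈ vis ∨ (r, c + 1) ∈ vis ∨ (r, c - 1) ∈ vis) then
          PySem.Set.add acc (r, c)
        else acc) acc ↔
      y ∈ acc ∨ ∃ c : Int, (0 ≤ c ∧ c < C.w) ∧ y = (r, c) ∧
        PySem.List.pyGetD (PySem.List.pyGetD C.grid r []) c 0 = 0 ∧
        ((r + 1, c) ∈ vis ∨ (r - 1, c) ∈ vis ∨ (r, c + 1) ∈ vis ∨ (r, c - 1) ∈ vis) := by
    intro r acc
    rw [mem_foldl_iff _ (fun c z => z = (r, c) ∧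
        PySem.List.pyGetD (PySem.List.pyGetD C.grid r []) c 0 = 0 ∧
        ((r + 1, c) ∈ vis ∨ (r - 1, c) ∈ vis ∨ (r, c + 1) ∈ vis ∨ (r, c - 1) ∈ vis)) y]
    · simp [PySem.List.mem_pyRange_one]
    · intro s c
      split_ifs with h1 <;> simp [PySem.Set.mem_add, h1] <;> tauto
  rw [pvGrow, mem_foldl_iff _ (fun r z => ∃ c : Int, (0 ≤ c ∧ c < C.w) ∧ z = (r, c) ∧
      PySem.List.pyGetD (PySem.List.pyGetD C.grid r []) c 0 = 0 ∧
      ((r + 1, c) ∈ vis ∨ (r - 1, c) ∈ vis ∨ (r, c + 1) ∈ vis ∨ (r, c - 1) ∈ vis)) y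
        (fun s r => hinner r s)]
  simp only [PySem.List.mem_pyRange_one]
  constructor
  · rintro (h | ⟨r, ⟨hr1, hr2⟩, c, ⟨hc1, hc2⟩, rfl, hg, hnb⟩)
    · exact Or.inl h
    · exact Or.inr ⟨⟨hr1, hr2, hc1, hc2⟩, hg, hnb⟩
  · rintro (h | ⟨⟨hr1, hr2, hc1, hc2⟩, hg, hnb⟩)
    · exact Or.inl h
    · exact Or.inr ⟨y.1, ⟨hr1, hr2⟩, y.2, ⟨hc1, hc2⟩, rfl, hg, hnb⟩

lemma grow_extends (C : pvCtx) (vis : PySem.Set (Int × Int)) :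
    ∃ t, pvGrow C.grid C.h C.w vis = vis ++ t := by
  refine foldl_extends _ (fun acc r => ?_) _ vis
  refine foldl_extends _ (fun acc' c => ?_) _ acc
  split_ifs with h1
  · rw [PySem.Set.add_eq_ite]
    split_ifs with h2
    · exact ⟨[], by simp⟩
    · exact ⟨[(r, c)], rfl⟩
  · exact ⟨[], by simp⟩

lemma nodup_grow (C : pvCtx) {vis : PySem.Set (Int × Int)} (hv : vis.Nodup) :
    (pvGrow C.grid C.h C.w vis).Nodup := by
  refine nodup_foldl _ (fun acc r hacc => ?_) _ vis hv
  refine nodup_foldl _ (fun acc' c hacc' => ?_) _ acc hacc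
  split_ifs with h1
  · exact PySem.Set.nodup_add _ _ hacc'
  · exact hacc'

def pvFix (C : pvCtx) (vis : PySem.Set (Int × Int)) : Prop :=
  ∀ y, y ∈ pvGrow C.grid C.h C.w vis ↔ y ∈ vis

lemma length_le_cells (C : pvCtx) {vis : PySem.Set (Int × Int)}
    (hn : vis.Nodup) (hin : ∀ y ∈ vis, C.InR y) :
    vis.length ≤ C.grid.length * (C.grid.headD []).length := by
  have hsub : vis ⊆ (PySem.List.pyRange 0 C.h 1).flatMap
      (fun r => (PySem.List.pyRange 0 C.w 1).map fun c => (r, c)) := by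
    intro y hy
    obtain ⟨h1, h2, h3, h4⟩ := hin y hy
    refine List.mem_flatMap.mpr ⟨y.1, PySem.List.mem_pyRange_one.mpr ⟨h1, h2⟩, ?_⟩
    exact List.mem_map.mpr ⟨y.2, PySem.List.mem_pyRange_one.mpr ⟨h3, h4⟩, rfl⟩
  have hlen := (List.subperm_of_subset hn hsub).length_le
  have hflat : ((PySem.List.pyRange 0 C.h 1).flatMap
      (fun r => (PySem.List.pyRange 0 C.w 1).map fun c => (r, c))).length =
      C.grid.length * (C.grid.headD []).length := by
    rw [List.length_flatMap]
    have hcong : (List.map (fun r => ((PySem.List.pyRange 0 C.w 1).map fun c => (r, c)).length)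
        (PySem.List.pyRange 0 C.h 1)) =
        List.map (fun _ => (C.grid.headD []).length) (PySem.List.pyRange 0 C.h 1) := by
      refine List.map_congr_left (fun r _ => ?_)
      simp only [List.length_map, PySem.List.length_pyRange_one]
      unfold pvCtx.w
      omega
    rw [hcong]
    simp only [List.map_const', List.sum_replicate_nat]
    rw [PySem.List.length_pyRange_one]
    unfold pvCtx.h
    have h0 : ((C.grid.length : Int) - 0).toNat = C.grid.length := by omega
    rw [h0]
  exact hflat ▸ hlen

lemma grow_elems (C : pvCtx) {vis : PySem.Set (Int × Int)} (hin : ∀ y ∈ vis, C.InR y) :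
    ∀ y ∈ pvGrow C.grid C.h C.w vis, C.InR y := by
  intro y hy
  rcases (mem_grow C vis y).mp hy with h | h
  · exact hin y h
  · exact h.1

lemma loopB_fix (C : pvCtx) :
    ∀ (n : Nat) (vis : PySem.Set (Int × Int)), vis.Nodup → (∀ y ∈ vis, C.InR y) →
      C.grid.length * (C.grid.headD []).length ≤ vis.length + n →
      pvFix C (pvLoopB C.grid C.h C.w n vis) := by
  intro n
  induction n with
  | zero =>
    intro vis hn hin hlen
    obtain ⟨t, ht⟩ := grow_extends C vis
    have hle := length_le_cells C (vis := pvGrow C.grid C.h C.w vis)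
      (nodup_grow C hn) (grow_elems C hin)
    have ht0 : t = [] := by
      rw [ht, List.length_append] at hle
      refine List.length_eq_zero_iff.mp ?_
      omega
    rw [ht0, List.append_nil] at ht
    intro y
    rw [pvLoopB, ht]
  | succ n ih =>
    intro vis hn hin hlen
    rw [pvLoopB]
    by_cases heq : PySem.Set.equal (pvGrow C.grid C.h C.w vis) vis = true
    · rw [if_pos heq]
      intro y
      exact (PySem.Set.equal_iff _ _).mp heq y
    · rw [if_neg heq]
      obtain ⟨t, ht⟩ := grow_extends C vis
      have ht0 : t ≠ [] := by
        intro h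
        rw [h, List.append_nil] at ht
        exact heq ((PySem.Set.equal_iff _ _).mpr (by rw [ht]; intro x; rfl))
      refine ih _ (nodup_grow C hn) (grow_elems C hin) ?_
      rw [ht, List.length_append]
      have := List.length_pos_iff.mpr ht0
      omega

lemma loopB_mono (C : pvCtx) :
    ∀ (n : Nat) (vis : PySem.Set (Int × Int)) (y : Int × Int),
      y ∈ vis → y ∈ pvLoopB C.grid C.h C.w n vis := by
  intro n
  induction n with
  | zero => intro vis y hy; rw [pvLoopB]; exact hy
  | succ n ih =>
    intro vis y hy
    rw [pvLoopB]
    split_ifs with heq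
    · exact hy
    · exact ih _ _ ((mem_grow C vis y).mpr (Or.inl hy))

lemma loopB_inv (C : pvCtx) (P : Int × Int → Prop)
    (hgrow : ∀ vis, (∀ y ∈ vis, P y) → ∀ y ∈ pvGrow C.grid C.h C.w vis, P y) :
    ∀ (n : Nat) (vis : PySem.Set (Int × Int)), (∀ y ∈ vis, P y) →
      ∀ y ∈ pvLoopB C.grid C.h C.w n vis, P y := by
  intro n
  induction n with
  | zero => intro vis hvis; rw [pvLoopB]; exact hvis
  | succ n ih =>
    intro vis hvis
    rw [pvLoopB]
    split_ifs with heq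
    · exact hvis
    · exact ih _ (hgrow vis hvis)

lemma seedB_elems (C : pvCtx) : ∀ y ∈ pvSeedB C.grid C.h C.w, C.InR y ∧ C.g y.1 y.2 = 0 := by
  intro y hy
  rcases (mem_seedB C y).mp hy with ⟨c, hc1, hc2, (⟨rfl, hg⟩ | ⟨rfl, hg⟩)⟩
  · exact ⟨⟨le_refl 0, C.h_pos, hc1, hc2⟩, hg⟩
  · have := C.h_pos
    exact ⟨⟨by omega, by omega, hc1, hc2⟩, hg⟩

lemma seedB_nodup (C : pvCtx) : (pvSeedB C.grid C.h C.w).Nodup := by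
  refine nodup_foldl _ (fun s c hs => ?_) _ _ List.nodup_nil
  dsimp only
  split_ifs with h1 h2 h2 <;>
    first
      | exact hs
      | exact PySem.Set.nodup_add _ _ hs
      | exact PySem.Set.nodup_add _ _ (PySem.Set.nodup_add _ _ hs)

lemma W_fix (C : pvCtx) : pvFix C (pvW C) := by
  refine loopB_fix C _ _ (seedB_nodup C) (fun y hy => (seedB_elems C y hy).1) (by omega)

lemma W_closed (C : pvCtx) {p : Int × Int} (hp : C.InR p) (hg : C.g p.1 p.2 = 0)
    (hnb : (p.1 + 1, p.2) ∈ pvW C ∨ (p.1 - 1, p.2) ∈ pvW C ∨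
           (p.1, p.2 + 1) ∈ pvW C ∨ (p.1, p.2 - 1) ∈ pvW C) : p ∈ pvW C := by
  exact (W_fix C p).mp ((mem_grow C _ p).mpr (Or.inr ⟨hp, hg, hnb⟩))

lemma base_sub_W (C : pvCtx) {p : Int × Int} (hp : C.InR p)
    (hb : p.1 = 0 ∨ p.1 = C.h - 1) (hg : C.g p.1 p.2 = 0) : p ∈ pvW C := by
  obtain ⟨a, b⟩ := p
  refine loopB_mono C _ _ _ ((mem_seedB C (a, b)).mpr ⟨b, hp.2.2.1, hp.2.2.2, ?_⟩)
  rcases hb with h | h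
  · change a = 0 at h
    subst h
    exact Or.inl ⟨rfl, hg⟩
  · change a = C.h - 1 at h
    subst h
    exact Or.inr ⟨rfl, hg⟩

-- ---------- A-side lemmas ----------

def pvNbr (p d : Int × Int) : Int × Int := (p.1 + d.1, p.2 + d.2)

def pvNOK (C : pvCtx) (v : List (List Bool)) (p : Int × Int) : Prop :=
  ∀ d ∈ pvDirs, C.InR (pvNbr p d) → C.g (pvNbr p d).1 (pvNbr p d).2 = 0 →
    pvVget v (pvNbr p d).1 (pvNbr p d).2 = true

lemma nok_mono (C : pvCtx) {v v' : List (List Bool)}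
    (hm : ∀ p, C.InR p → pvVget v p.1 p.2 = true → pvVget v' p.1 p.2 = true)
    {p : Int × Int} (h : pvNOK C v p) : pvNOK C v' p :=
  fun d hd h1 h2 => hm _ h1 (h d hd h1 h2)

lemma stepA_elim (C : pvCtx) (r c : Int) (s : List (List Bool) × List (Int × Int))
    (d : Int × Int) :
    (pvStepA C.grid C.h C.w r c s d = s ∧
      (C.InR (r + d.1, c + d.2) → C.g (r + d.1) (c + d.2) = 0 →
        pvVget s.1 (r + d.1) (c + d.2) = true)) ∨
    (C.InR (r + d.1, c + d.2) ∧ C.g (r + d.1) (c + d.2) = 0 ∧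
      pvVget s.1 (r + d.1) (c + d.2) = false ∧
      pvStepA C.grid C.h C.w r c s d =
        (pvVset s.1 (r + d.1) (c + d.2), s.2 ++ [(r + d.1, c + d.2)])) := by
  unfold pvStepA
  by_cases hg : 0 ≤ r + d.1 ∧ r + d.1 < C.h ∧ 0 ≤ c + d.2 ∧ c + d.2 < C.w ∧
      pvVget s.1 (r + d.1) (c + d.2) = false ∧ pvAget C.grid (r + d.1) (c + d.2) = 0
  · right
    exact ⟨⟨hg.1, hg.2.1, hg.2.2.1, hg.2.2.2.1⟩, hg.2.2.2.2.2, hg.2.2.2.2.1, by simp [hg]⟩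
  · left
    refine ⟨by simp [hg], ?_⟩
    intro hin hz
    obtain ⟨h1, h2, h3, h4⟩ := hin
    by_cases hv : pvVget s.1 (r + d.1) (c + d.2) = true
    · exact hv
    · exact absurd ⟨h1, h2, h3, h4, by simpa using hv, hz⟩ hg

lemma foldA_pres (C : pvCtx) (r c : Int) (hrcW : (r, c) ∈ pvW C) :
    ∀ (ds : List (Int × Int)), (∀ d ∈ ds, d ∈ pvDirs) →
    ∀ (s : List (List Bool) × List (Int × Int)),
      pvShape C s.1 →
      (∀ p ∈ s.2, C.InR p ∧ pvVget s.1 p.1 p.2 = true) →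
      (∀ p, C.InR p → pvVget s.1 p.1 p.2 = true → p ∈ pvW C) →
      (∀ p, C.InR p → pvVget s.1 p.1 p.2 = true → p ∈ s.2 ∨ p = (r, c) ∨ pvNOK C s.1 p) →
      (∀ d ∈ pvDirs, d ∈ ds ∨ (C.InR (pvNbr (r, c) d) → C.g (pvNbr (r, c) d).1 (pvNbr (r, c) d).2 = 0 →
        pvVget s.1 (pvNbr (r, c) d).1 (pvNbr (r, c) d).2 = true)) →
      pvShape C (ds.foldl (pvStepA C.grid C.h C.w r c) s).1 ∧
      (∀ p, C.InR p → pvVget s.1 p.1 p.2 = true →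
        pvVget (ds.foldl (pvStepA C.grid C.h C.w r c) s).1 p.1 p.2 = true) ∧
      (∀ p ∈ (ds.foldl (pvStepA C.grid C.h C.w r c) s).2, C.InR p ∧
        pvVget (ds.foldl (pvStepA C.grid C.h C.w r c) s).1 p.1 p.2 = true) ∧
      (∀ p, C.InR p → pvVget (ds.foldl (pvStepA C.grid C.h C.w r c) s).1 p.1 p.2 = true →
        p ∈ pvW C) ∧
      (∀ p, C.InR p → pvVget (ds.foldl (pvStepA C.grid C.h C.w r c) s).1 p.1 p.2 = true →
        p ∈ (ds.foldl (pvStepA C.grid C.h C.w r c) s).2 ∨ p = (r, c) ∨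
          pvNOK C (ds.foldl (pvStepA C.grid C.h C.w r c) s).1 p) ∧
      (∀ d ∈ pvDirs, C.InR (pvNbr (r, c) d) → C.g (pvNbr (r, c) d).1 (pvNbr (r, c) d).2 = 0 →
        pvVget (ds.foldl (pvStepA C.grid C.h C.w r c) s).1 (pvNbr (r, c) d).1 (pvNbr (r, c) d).2 = true) ∧
      2 * pvCnt (ds.foldl (pvStepA C.grid C.h C.w r c) s).1 +
        (ds.foldl (pvStepA C.grid C.h C.w r c) s).2.length ≤ 2 * pvCnt s.1 + s.2.length := by
  intro ds
  induction ds with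
  | nil =>
    intro _ s hsh hq hsnd hal hcl
    refine ⟨hsh, fun p _ hv => hv, hq, hsnd, fun p hp hv => ?_, fun d hd => ?_, le_refl _⟩
    · rcases hal p hp hv with h | h | h
      · exact Or.inl h
      · exact Or.inr (Or.inl h)
      · exact Or.inr (Or.inr h)
    · rcases hcl d hd with h | h
      · exact absurd h (List.not_mem_nil)
      · exact h
  | cons d0 ds ih =>
    intro hsub s hsh hq hsnd hal hcl
    have hd0 : d0 ∈ pvDirs := hsub d0 List.mem_cons_self
    have hsub' : ∀ d ∈ ds, d ∈ pvDirs := fun d hd => hsub d (List.mem_cons_of_mem _ hd)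
    rw [List.foldl_cons]
    rcases stepA_elim C r c s d0 with ⟨heq, hnok⟩ | ⟨hin0, hg0, hv0, heq⟩
    · -- the step is a no-op
      rw [heq]
      refine ih hsub' s hsh hq hsnd hal (fun d hd => ?_)
      by_cases hdd : d = d0
      · subst hdd
        exact Or.inr hnok
      · rcases hcl d hd with h | h
        · rcases List.mem_cons.mp h with h' | h'
          · exact absurd h' hdd
          · exact Or.inl h'
        · exact Or.inr h
    · -- the step marks (r + d0.1, c + d0.2) and pushes it
      rw [heq]
      set p0 : Int × Int := (r + d0.1, c + d0.2) with hp0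
      rw [show (pvVset s.1 (r + d0.1) (c + d0.2), s.2 ++ [(r + d0.1, c + d0.2)]) =
        (pvVset s.1 p0.1 p0.2, s.2 ++ [p0]) from rfl]
      have hsh1 : pvShape C (pvVset s.1 p0.1 p0.2) := shape_vset C hsh hin0
      have hmono1 : ∀ p, C.InR p → pvVget s.1 p.1 p.2 = true →
          pvVget (pvVset s.1 p0.1 p0.2) p.1 p.2 = true := by
        intro p hp hv
        rw [vget_vset C hsh hin0 hp.1 hp.2.2.1]
        split_ifs with hpe
        · rfl
        · exact hv
      have hself : pvVget (pvVset s.1 p0.1 p0.2) p0.1 p0.2 = true := by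
        rw [vget_vset C hsh hin0 hin0.1 hin0.2.2.1]
        simp
      have hp0W : p0 ∈ pvW C := by
        have hrcW' := hrcW
        refine W_closed C hin0 hg0 ?_
        have : d0 = ((0:Int),(1:Int)) ∨ d0 = ((0:Int),(-1:Int)) ∨ d0 = ((1:Int),(0:Int)) ∨ d0 = ((-1:Int),(0:Int)) := by
          simpa [pvDirs] using hd0
        rcases this with rfl | rfl | rfl | rfl
        · refine Or.inr (Or.inr (Or.inr ?_))
          have e : (p0.1, p0.2 - 1) = (r, c) := by
            rw [hp0]; simp
          rw [e]; exact hrcW'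
        · refine Or.inr (Or.inr (Or.inl ?_))
          have e : (p0.1, p0.2 + 1) = (r, c) := by
            rw [hp0]; simp
          rw [e]; exact hrcW'
        · refine Or.inr (Or.inl ?_)
          have e : (p0.1 - 1, p0.2) = (r, c) := by
            rw [hp0]; simp
          rw [e]; exact hrcW'
        · refine Or.inl ?_
          have e : (p0.1 + 1, p0.2) = (r, c) := by
            rw [hp0]; simp
          rw [e]; exact hrcW'
      have hvchar : ∀ p : Int × Int, C.InR p →
          pvVget (pvVset s.1 p0.1 p0.2) p.1 p.2 = true → p = p0 ∨ pvVget s.1 p.1 p.2 = true := by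
        intro p hp hv
        rw [vget_vset C hsh hin0 hp.1 hp.2.2.1] at hv
        split_ifs at hv with hpe
        · left
          rw [← hpe]
        · exact Or.inr hv
      have hq1 : ∀ p ∈ s.2 ++ [p0], C.InR p ∧ pvVget (pvVset s.1 p0.1 p0.2) p.1 p.2 = true := by
        intro p hp
        rcases List.mem_append.mp hp with h | h
        · exact ⟨(hq p h).1, hmono1 p (hq p h).1 (hq p h).2⟩
        · rcases List.mem_singleton.mp h with rfl
          exact ⟨hin0, hself⟩
      have hsnd1 : ∀ p, C.InR p → pvVget (pvVset s.1 p0.1 p0.2) p.1 p.2 = true → p ∈ pvW C := by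
        intro p hp hv
        rcases hvchar p hp hv with rfl | hv'
        · exact hp0W
        · exact hsnd p hp hv'
      have hal1 : ∀ p, C.InR p → pvVget (pvVset s.1 p0.1 p0.2) p.1 p.2 = true →
          p ∈ s.2 ++ [p0] ∨ p = (r, c) ∨ pvNOK C (pvVset s.1 p0.1 p0.2) p := by
        intro p hp hv
        rcases hvchar p hp hv with rfl | hv'
        · exact Or.inl (List.mem_append.mpr (Or.inr (List.mem_singleton.mpr rfl)))
        · rcases hal p hp hv' with h | h | h
          · exact Or.inl (List.mem_append.mpr (Or.inl h))
          · exact Or.inr (Or.inl h)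
          · exact Or.inr (Or.inr (nok_mono C hmono1 h))
      have hcl1 : ∀ d ∈ pvDirs, d ∈ ds ∨ (C.InR (pvNbr (r, c) d) →
          C.g (pvNbr (r, c) d).1 (pvNbr (r, c) d).2 = 0 →
          pvVget (pvVset s.1 p0.1 p0.2) (pvNbr (r, c) d).1 (pvNbr (r, c) d).2 = true) := by
        intro d hd
        by_cases hdd : d = d0
        · subst hdd
          exact Or.inr (fun _ _ => hself)
        · rcases hcl d hd with h | h
          · rcases List.mem_cons.mp h with h' | h'
            · exact absurd h' hdd
            · exact Or.inl h'
          · exact Or.inr (fun h1 h2 => hmono1 _ h1 (h h1 h2))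
      obtain ⟨c1, c2, c3, c4, c5, c6, c7⟩ :=
        ih hsub' (pvVset s.1 p0.1 p0.2, s.2 ++ [p0]) hsh1 hq1 hsnd1 hal1 hcl1
      have hcnt := cnt_vset C hsh hin0 hv0
      refine ⟨c1, fun p hp hv => c2 p hp (hmono1 p hp hv), c3, c4, c5, c6, ?_⟩
      simp only [List.length_append, List.length_singleton] at c7 ⊢
      omega

lemma bfs_bundle (C : pvCtx) :
    ∀ (n : Nat) (v : List (List Bool)) (q : List (Int × Int)),
      pvShape C v →
      (∀ p ∈ q, C.InR p ∧ pvVget v p.1 p.2 = true) →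
      (∀ p, C.InR p → pvVget v p.1 p.2 = true → p ∈ pvW C) →
      (∀ p, C.InR p → pvVget v p.1 p.2 = true → p ∈ q ∨ pvNOK C v p) →
      2 * pvCnt v + q.length ≤ n →
      pvShape C (pvBfs C.grid C.h C.w n v q) ∧
      (∀ p, C.InR p → pvVget v p.1 p.2 = true →
        pvVget (pvBfs C.grid C.h C.w n v q) p.1 p.2 = true) ∧
      (∀ p, C.InR p → pvVget (pvBfs C.grid C.h C.w n v q) p.1 p.2 = true → p ∈ pvW C) ∧
      (∀ p, C.InR p → pvVget (pvBfs C.grid C.h C.w n v q) p.1 p.2 = true →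
        pvNOK C (pvBfs C.grid C.h C.w n v q) p) := by
  intro n
  induction n with
  | zero =>
    intro v q hsh hq hsnd hal hm
    cases q with
    | nil =>
      rw [pvBfs]
      exact ⟨hsh, fun p _ hv => hv, hsnd, fun p hp hv => (hal p hp hv).resolve_left
        (List.not_mem_nil)⟩
    | cons p0 q =>
      exfalso
      simp only [List.length_cons] at hm
      omega
  | succ n ih =>
    intro v q hsh hq hsnd hal hm
    cases q with
    | nil =>
      rw [pvBfs]
      exact ⟨hsh, fun p _ hv => hv, hsnd, fun p hp hv => (hal p hp hv).resolve_left
        (List.not_mem_nil)⟩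
    | cons p0 q =>
      obtain ⟨r, c⟩ := p0
      rw [pvBfs]
      have hrc : C.InR (r, c) ∧ pvVget v r c = true := hq (r, c) List.mem_cons_self
      have hrcW : (r, c) ∈ pvW C := hsnd _ hrc.1 hrc.2
      have hq' : ∀ p ∈ q, C.InR p ∧ pvVget v p.1 p.2 = true :=
        fun p hp => hq p (List.mem_cons_of_mem _ hp)
      have hal' : ∀ p, C.InR p → pvVget v p.1 p.2 = true →
          p ∈ q ∨ p = (r, c) ∨ pvNOK C v p := by
        intro p hp hv
        rcases hal p hp hv with h | h
        · rcases List.mem_cons.mp h with h' | h'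
          · exact Or.inr (Or.inl h')
          · exact Or.inl h'
        · exact Or.inr (Or.inr h)
      obtain ⟨c1, c2, c3, c4, c5, c6, c7⟩ :=
        foldA_pres C r c hrcW pvDirs (fun d hd => hd) (v, q) hsh hq' hsnd hal'
          (fun d hd => Or.inl hd)
      have hm' : 2 * pvCnt (pvDirs.foldl (pvStepA C.grid C.h C.w r c) (v, q)).1 +
          (pvDirs.foldl (pvStepA C.grid C.h C.w r c) (v, q)).2.length ≤ n := by
        have c7' : 2 * pvCnt (pvDirs.foldl (pvStepA C.grid C.h C.w r c) (v, q)).1 +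
            (pvDirs.foldl (pvStepA C.grid C.h C.w r c) (v, q)).2.length ≤
            2 * pvCnt v + q.length := c7
        simp only [List.length_cons] at hm
        omega
      have hal'' : ∀ p, C.InR p →
          pvVget (pvDirs.foldl (pvStepA C.grid C.h C.w r c) (v, q)).1 p.1 p.2 = true →
          p ∈ (pvDirs.foldl (pvStepA C.grid C.h C.w r c) (v, q)).2 ∨
            pvNOK C (pvDirs.foldl (pvStepA C.grid C.h C.w r c) (v, q)).1 p := by
        intro p hp hv
        rcases c5 p hp hv with h | h | h
        · exact Or.inl h
        · subst h
          exact Or.inr (fun d hd h1 h2 => c6 d hd h1 h2)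
        · exact Or.inr h
      obtain ⟨b1, b2, b3, b4⟩ := ih _ _ c1 c3 c4 hal'' hm'
      exact ⟨b1, fun p hp hv => b2 p hp (c2 p hp hv), b3, b4⟩

-- ---------- seeding stage ----------

def pvISeed (C : pvCtx) (s : List (List Bool) × List (Int × Int)) : Prop :=
  pvShape C s.1 ∧
  (∀ p ∈ s.2, C.InR p ∧ pvVget s.1 p.1 p.2 = true) ∧
  (∀ p, C.InR p → pvVget s.1 p.1 p.2 = true → p ∈ s.2) ∧
  (∀ p, C.InR p → pvVget s.1 p.1 p.2 = true → p ∈ pvW C)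

lemma markA_pres (C : pvCtx) {r c : Int} (hp : C.InR (r, c))
    (hbase : r = 0 ∨ r = C.h - 1) (s : List (List Bool) × List (Int × Int))
    (hI : pvISeed C s) :
    pvISeed C (if pvAget C.grid r c = 0 ∧ pvVget s.1 r c = false
        then (pvVset s.1 r c, s.2 ++ [(r, c)]) else s) ∧
    (∀ p', C.InR p' → pvVget s.1 p'.1 p'.2 = true →
      pvVget (if pvAget C.grid r c = 0 ∧ pvVget s.1 r c = false
        then (pvVset s.1 r c, s.2 ++ [(r, c)]) else s).1 p'.1 p'.2 = true) ∧
    (C.g r c = 0 →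
      pvVget (if pvAget C.grid r c = 0 ∧ pvVget s.1 r c = false
        then (pvVset s.1 r c, s.2 ++ [(r, c)]) else s).1 r c = true) ∧
    2 * pvCnt (if pvAget C.grid r c = 0 ∧ pvVget s.1 r c = false
        then (pvVset s.1 r c, s.2 ++ [(r, c)]) else s).1 +
      (if pvAget C.grid r c = 0 ∧ pvVget s.1 r c = false
        then (pvVset s.1 r c, s.2 ++ [(r, c)]) else s).2.length ≤
      2 * pvCnt s.1 + s.2.length := by
  obtain ⟨hsh, hQ, hvq, hsnd⟩ := hI
  split_ifs with hgd
  · obtain ⟨hg0, hv0⟩ := hgd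
    have hmono : ∀ p', C.InR p' → pvVget s.1 p'.1 p'.2 = true →
        pvVget (pvVset s.1 r c) p'.1 p'.2 = true := by
      intro p' hp' hv
      rw [show pvVset s.1 r c = pvVset s.1 ((r, c) : Int × Int).1 ((r, c) : Int × Int).2 from rfl,
        vget_vset C hsh hp hp'.1 hp'.2.2.1]
      split_ifs with hpe
      · rfl
      · exact hv
    have hself : pvVget (pvVset s.1 r c) r c = true := by
      rw [show pvVset s.1 r c = pvVset s.1 ((r, c) : Int × Int).1 ((r, c) : Int × Int).2 from rfl,
        vget_vset C hsh hp hp.1 hp.2.2.1]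
      simp
    have hchar : ∀ p', C.InR p' → pvVget (pvVset s.1 r c) p'.1 p'.2 = true →
        p' = (r, c) ∨ pvVget s.1 p'.1 p'.2 = true := by
      intro p' hp' hv
      rw [show pvVset s.1 r c = pvVset s.1 ((r, c) : Int × Int).1 ((r, c) : Int × Int).2 from rfl,
        vget_vset C hsh hp hp'.1 hp'.2.2.1] at hv
      split_ifs at hv with hpe
      · left; rw [← hpe]
      · exact Or.inr hv
    have hWp : (r, c) ∈ pvW C := base_sub_W C hp hbase hg0
    refine ⟨⟨shape_vset C hsh hp, ?_, ?_, ?_⟩, hmono, fun _ => hself, ?_⟩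
    · intro p' hp'
      rcases List.mem_append.mp hp' with h | h
      · exact ⟨(hQ p' h).1, hmono p' (hQ p' h).1 (hQ p' h).2⟩
      · rcases List.mem_singleton.mp h with rfl
        exact ⟨hp, hself⟩
    · intro p' hp' hv
      rcases hchar p' hp' hv with rfl | hv'
      · exact List.mem_append.mpr (Or.inr (List.mem_singleton.mpr rfl))
      · exact List.mem_append.mpr (Or.inl (hvq p' hp' hv'))
    · intro p' hp' hv
      rcases hchar p' hp' hv with rfl | hv'
      · exact hWp
      · exact hsnd p' hp' hv'
    · have hc2 : pvCnt (pvVset s.1 r c) + 1 = pvCnt s.1 := cnt_vset C (p := (r, c)) hsh hp hv0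
      simp only [List.length_append, List.length_singleton]
      omega
  · refine ⟨⟨hsh, hQ, hvq, hsnd⟩, fun p' _ hv => hv, ?_, le_refl _⟩
    intro hg0
    by_cases hv : pvVget s.1 r c = true
    · exact hv
    · exact absurd ⟨hg0, by simpa using hv⟩ hgd

lemma seedA_pres (C : pvCtx) {c : Int} (hc : 0 ≤ c ∧ c < C.w)
    (s : List (List Bool) × List (Int × Int)) (hI : pvISeed C s) :
    pvISeed C (pvSeedA C.grid C.h s c) ∧
    (∀ p', C.InR p' → pvVget s.1 p'.1 p'.2 = true →
      pvVget (pvSeedA C.grid C.h s c).1 p'.1 p'.2 = true) ∧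
    (C.g 0 c = 0 → pvVget (pvSeedA C.grid C.h s c).1 0 c = true) ∧
    (C.g (C.h - 1) c = 0 → pvVget (pvSeedA C.grid C.h s c).1 (C.h - 1) c = true) ∧
    2 * pvCnt (pvSeedA C.grid C.h s c).1 + (pvSeedA C.grid C.h s c).2.length ≤
      2 * pvCnt s.1 + s.2.length := by
  have hin0 : C.InR ((0 : Int), c) := ⟨le_refl 0, C.h_pos, hc.1, hc.2⟩
  have hin1 : C.InR (C.h - 1, c) := ⟨by have := C.h_pos; omega, by omega, hc.1, hc.2⟩
  obtain ⟨hI1, hmono1, hmark1, hmeas1⟩ := markA_pres C hin0 (Or.inl rfl) s hI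
  set s1 := if pvAget C.grid 0 c = 0 ∧ pvVget s.1 0 c = false
    then (pvVset s.1 0 c, s.2 ++ [((0 : Int), c)]) else s with hs1
  obtain ⟨hI2, hmono2, hmark2, hmeas2⟩ := markA_pres C hin1 (Or.inr rfl) s1 hI1
  have hstep : pvSeedA C.grid C.h s c =
      (if pvAget C.grid (C.h - 1) c = 0 ∧ pvVget s1.1 (C.h - 1) c = false
        then (pvVset s1.1 (C.h - 1) c, s1.2 ++ [(C.h - 1, c)]) else s1) := rfl
  rw [hstep]
  refine ⟨hI2, ?_, ?_, hmark2, by omega⟩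
  · intro p' hp' hv
    exact hmono2 p' hp' (hmono1 p' hp' hv)
  · intro hg0
    exact hmono2 _ hin0 (hmark1 hg0)

lemma seed_fold (C : pvCtx) :
    ∀ (l : List Int), (∀ c ∈ l, 0 ≤ c ∧ c < C.w) →
    ∀ (s : List (List Bool) × List (Int × Int)), pvISeed C s →
      pvISeed C (l.foldl (pvSeedA C.grid C.h) s) ∧
      (∀ p', C.InR p' → pvVget s.1 p'.1 p'.2 = true →
        pvVget (l.foldl (pvSeedA C.grid C.h) s).1 p'.1 p'.2 = true) ∧
      (∀ c ∈ l, (C.g 0 c = 0 → pvVget (l.foldl (pvSeedA C.grid C.h) s).1 0 c = true) ∧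
        (C.g (C.h - 1) c = 0 → pvVget (l.foldl (pvSeedA C.grid C.h) s).1 (C.h - 1) c = true)) ∧
      2 * pvCnt (l.foldl (pvSeedA C.grid C.h) s).1 +
        (l.foldl (pvSeedA C.grid C.h) s).2.length ≤ 2 * pvCnt s.1 + s.2.length := by
  intro l
  induction l with
  | nil =>
    intro _ s hI
    exact ⟨hI, fun p' _ hv => hv, fun c hc => absurd hc (List.not_mem_nil), le_refl _⟩
  | cons c0 l ih =>
    intro hcl s hI
    have hc0 := hcl c0 List.mem_cons_self
    have hcl' : ∀ c ∈ l, 0 ≤ c ∧ c < C.w := fun c hc => hcl c (List.mem_cons_of_mem _ hc)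
    obtain ⟨hI1, hmono1, hm01, hm11, hmeas1⟩ := seedA_pres C hc0 s hI
    obtain ⟨hI2, hmono2, hmarks2, hmeas2⟩ := ih hcl' _ hI1
    rw [List.foldl_cons]
    refine ⟨hI2, ?_, ?_, by omega⟩
    · intro p' hp' hv
      exact hmono2 p' hp' (hmono1 p' hp' hv)
    · intro c hc
      rcases List.mem_cons.mp hc with rfl | hc'
    
      · have h0 : C.InR ((0 : Int), c) := ⟨le_refl 0, C.h_pos, hc0.1, hc0.2⟩
        have h1 : C.InR (C.h - 1, c) := ⟨by have := C.h_pos; omega, by omega, hc0.1, hc0.2⟩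
        exact ⟨fun hg => hmono2 _ h0 (hm01 hg), fun hg => hmono2 _ h1 (hm11 hg)⟩
      · exact hmarks2 c hc'

-- ---------- the two visited sets coincide ----------

def pvV0 (C : pvCtx) : List (List Bool) :=
  List.replicate C.grid.length (List.replicate (C.grid.headD []).length false)

def pvFuel (C : pvCtx) : Nat :=
  2 * (C.grid.length * (C.grid.headD []).length) + 2 * (C.grid.headD []).length

def pvS0 (C : pvCtx) : List (List Bool) × List (Int × Int) :=
  (PySem.List.pyRange 0 C.w 1).foldl (pvSeedA C.grid C.h) (pvV0 C, [])

def pvF (C : pvCtx) : List (List Bool) :=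
  pvBfs C.grid C.h C.w (pvFuel C) (pvS0 C).1 (pvS0 C).2

lemma shape_v0 (C : pvCtx) : pvShape C (pvV0 C) := by
  constructor
  · simp [pvV0]
  · intro row hrow
    rw [List.eq_of_mem_replicate hrow]
    simp

lemma vget_v0 (C : pvCtx) {p : Int × Int} (hp : C.InR p) : pvVget (pvV0 C) p.1 p.2 = false := by
  rw [vget_eq _ hp.1 hp.2.2.1]
  have h1 : p.1.toNat < C.grid.length := toNat_lt_of_InR_left C hp
  have : (pvV0 C).getD p.1.toNat [] = List.replicate (C.grid.headD []).length false := by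
    simp [pvV0, List.getD_eq_getElem?_getD, List.getElem?_replicate, h1]
  rw [this]
  simp only [List.getD_eq_getElem?_getD, List.getElem?_replicate]
  split_ifs <;> rfl

lemma cnt_v0 (C : pvCtx) : pvCnt (pvV0 C) = C.grid.length * (C.grid.headD []).length := by
  simp [pvCnt, pvV0, List.map_replicate, List.count_replicate, List.sum_replicate_nat]

lemma iseed_v0 (C : pvCtx) : pvISeed C (pvV0 C, []) := by
  refine ⟨shape_v0 C, fun p hp => absurd hp (List.not_mem_nil), ?_, ?_⟩ <;>
    · intro p hp hv
      rw [vget_v0 C hp] at hv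
      exact absurd hv (by simp)

lemma F_facts (C : pvCtx) :
    (∀ p, C.InR p → pvVget (pvF C) p.1 p.2 = true → p ∈ pvW C) ∧
    (∀ p, C.InR p → pvVget (pvF C) p.1 p.2 = true → pvNOK C (pvF C) p) ∧
    (∀ p, C.InR p → pvVget (pvS0 C).1 p.1 p.2 = true → pvVget (pvF C) p.1 p.2 = true) := by
  obtain ⟨hI0, hmono0, hmarks0, hmeas0⟩ := seed_fold C (PySem.List.pyRange 0 C.w 1)
    (fun c hc => PySem.List.mem_pyRange_one.mp hc) (pvV0 C, []) (iseed_v0 C)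
  obtain ⟨hsh, hQ, hvq, hsnd⟩ := hI0
  have hmeas : 2 * pvCnt (pvS0 C).1 + (pvS0 C).2.length ≤ pvFuel C := by
    have h1 : 2 * pvCnt ((pvV0 C, ([] : List (Int × Int))).1) +
        ((pvV0 C, ([] : List (Int × Int))).2).length =
        2 * (C.grid.length * (C.grid.headD []).length) := by
      simp [cnt_v0 C]
    rw [pvFuel]
    have h2 := hmeas0
    rw [h1] at h2
    exact le_trans h2 (by omega)
  obtain ⟨b1, b2, b3, b4⟩ := bfs_bundle C (pvFuel C) (pvS0 C).1 (pvS0 C).2 hsh hQ hsnd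
    (fun p hp hv => Or.inl (hvq p hp hv)) hmeas
  exact ⟨b3, b4, b2⟩

lemma W_sub_F (C : pvCtx) : ∀ y ∈ pvW C, pvVget (pvF C) y.1 y.2 = true := by
  obtain ⟨hI0, hmono0, hmarks0, hmeas0⟩ := seed_fold C (PySem.List.pyRange 0 C.w 1)
    (fun c hc => PySem.List.mem_pyRange_one.mp hc) (pvV0 C, []) (iseed_v0 C)
  obtain ⟨hb3, hb4, hb2⟩ := F_facts C
  have hP : ∀ y ∈ pvW C, C.InR y ∧ pvVget (pvF C) y.1 y.2 = true := by
    refine loopB_inv C _ (fun vis hvis y hy => ?_) _ _ (fun y hy => ?_)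
    · rcases (mem_grow C vis y).mp hy with h | ⟨hin, hg, hnb⟩
      · exact hvis y h
      · refine ⟨hin, ?_⟩
        rcases hnb with h | h | h | h
        · obtain ⟨hqin, hqv⟩ := hvis _ h
          have e : pvNbr (y.1 + 1, y.2) ((-1 : Int), (0 : Int)) = y := by
            simp [pvNbr]
          have := hb4 _ hqin hqv ((-1 : Int), (0 : Int)) (by simp [pvDirs]) (by rw [e]; exact hin)
            (by rw [e]; exact hg)
          rw [e] at this
          exact this
        · obtain ⟨hqin, hqv⟩ := hvis _ h
          have e : pvNbr (y.1 - 1, y.2) ((1 : Int), (0 : Int)) = y := by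
            simp [pvNbr]
          have := hb4 _ hqin hqv ((1 : Int), (0 : Int)) (by simp [pvDirs]) (by rw [e]; exact hin)
            (by rw [e]; exact hg)
          rw [e] at this
          exact this
        · obtain ⟨hqin, hqv⟩ := hvis _ h
          have e : pvNbr (y.1, y.2 + 1) ((0 : Int), (-1 : Int)) = y := by
            simp [pvNbr]
          have := hb4 _ hqin hqv ((0 : Int), (-1 : Int)) (by simp [pvDirs]) (by rw [e]; exact hin)
            (by rw [e]; exact hg)
          rw [e] at this
          exact this
        · obtain ⟨hqin, hqv⟩ := hvis _ h
          have e : pvNbr (y.1, y.2 - 1) ((0 : Int), (1 : Int)) = y := by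
            simp [pvNbr]
          have := hb4 _ hqin hqv ((0 : Int), (1 : Int)) (by simp [pvDirs]) (by rw [e]; exact hin)
            (by rw [e]; exact hg)
          rw [e] at this
          exact this
    · -- seed elements are marked by the seeding loop and survive the BFS
      have hin := (seedB_elems C y hy).1
      refine ⟨hin, hb2 y hin ?_⟩
      rcases (mem_seedB C y).mp hy with ⟨c, hc1, hc2, (⟨rfl, hg⟩ | ⟨rfl, hg⟩)⟩
      · exact (hmarks0 c (PySem.List.mem_pyRange_one.mpr ⟨hc1, hc2⟩)).1 hg
      · exact (hmarks0 c (PySem.List.mem_pyRange_one.mpr ⟨hc1, hc2⟩)).2 hg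
  exact fun y hy => (hP y hy).2

lemma F_iff_W (C : pvCtx) {p : Int × Int} (hp : C.InR p) :
    pvVget (pvF C) p.1 p.2 = true ↔ p ∈ pvW C :=
  ⟨fun h => (F_facts C).1 p hp h, fun h => W_sub_F C p h⟩

-- ---------- the output stage ----------

lemma pySetD_getD_self (out : List (List Int)) (r : Int) (hr : 0 ≤ r)
    (hl : r.toNat < out.length) :
    PySem.List.pySetD out r (PySem.List.pyGetD out r []) = out := by
  rw [PySem.List.pySetD_of_nonneg _ _ hr, PySem.List.pyGetD_of_nonneg _ _ hr]
  rw [List.getD_eq_getElem _ _ hl]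
  exact List.set_getElem_self hl

lemma getD_pySetD_self (out : List (List Int)) (r : Int) (X : List Int) (hr : 0 ≤ r)
    (hl : r.toNat < out.length) :
    PySem.List.pyGetD (PySem.List.pySetD out r X) r [] = X := by
  rw [PySem.List.pySetD_of_nonneg _ _ hr, PySem.List.pyGetD_of_nonneg _ _ hr]
  simp [List.getD_eq_getElem?_getD, hl]

lemma pySetD_pySetD (out : List (List Int)) (r : Int) (X Y : List Int) (hr : 0 ≤ r) :
    PySem.List.pySetD (PySem.List.pySetD out r X) r Y = PySem.List.pySetD out r Y := by
  rw [PySem.List.pySetD_of_nonneg _ _ hr, PySem.List.pySetD_of_nonneg _ _ hr,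
    PySem.List.pySetD_of_nonneg _ _ hr]
  exact List.set_set X

def pvRowT (C : pvCtx) (vis : List (List Bool)) (r : Int) (row : List Int) : List Int :=
  (PySem.List.pyRange 0 C.w 1).foldl (fun row' c =>
    if pvAget C.grid r c = 0 ∧ pvVget vis r c = false
    then PySem.List.pySetD row' c 4 else row') row

lemma inner_comm (C : pvCtx) (vis : List (List Bool)) (r : Int) :
    ∀ (l : List Int) (out : List (List Int)), 0 ≤ r → r.toNat < out.length →
      l.foldl (fun out c =>
        if pvAget C.grid r c = 0 ∧ pvVget vis r c = false
        then PySem.List.pySetD out r (PySem.List.pySetD (PySem.List.pyGetD out r []) c 4)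
        else out) out =
      PySem.List.pySetD out r (l.foldl (fun row' c =>
        if pvAget C.grid r c = 0 ∧ pvVget vis r c = false
        then PySem.List.pySetD row' c 4 else row') (PySem.List.pyGetD out r [])) := by
  intro l
  induction l with
  | nil =>
    intro out hr hl
    exact (pySetD_getD_self out r hr hl).symm
  | cons c0 l ih =>
    intro out hr hl
    rw [List.foldl_cons, List.foldl_cons]
    by_cases hcond : pvAget C.grid r c0 = 0 ∧ pvVget vis r c0 = false
    · rw [if_pos hcond, if_pos hcond]
      have hl1 : r.toNat < (PySem.List.pySetD out r
          (PySem.List.pySetD (PySem.List.pyGetD out r []) c0 4)).length := by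
        rw [PySem.List.length_pySetD]
        exact hl
      rw [ih _ hr hl1]
      rw [getD_pySetD_self _ _ _ hr hl, pySetD_pySetD _ _ _ _ hr]
    · rw [if_neg hcond, if_neg hcond]
      exact ih out hr hl

lemma rowT_aux (C : pvCtx) (vis : List (List Bool)) (r : Int) (row : List Int)
    (hrow : (C.grid.headD []).length ≤ row.length) :
    ∀ b : Nat, b ≤ (C.grid.headD []).length →
      ((PySem.List.pyRange 0 (b : Int) 1).foldl (fun row' c =>
        if pvAget C.grid r c = 0 ∧ pvVget vis r c = false
        then PySem.List.pySetD row' c 4 else row') row).length = row.length ∧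
      ∀ j : Nat, j < row.length →
        ((PySem.List.pyRange 0 (b : Int) 1).foldl (fun row' c =>
          if pvAget C.grid r c = 0 ∧ pvVget vis r c = false
          then PySem.List.pySetD row' c 4 else row') row).getD j 0 =
        if (j : Int) < (b : Int) ∧ pvAget C.grid r (j : Int) = 0 ∧ pvVget vis r (j : Int) = false
        then 4 else row.getD j 0 := by
  intro b
  induction b with
  | zero =>
    intro _
    rw [PySem.List.pyRange_one_eq_nil (by omega : ((0:Nat) : Int) ≤ 0)]
    constructor
    · simp
    · intro j hj
      rw [if_neg (by push_neg; intro h; omega)]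
      simp
  | succ b ih =>
    intro hb
    obtain ⟨ihl, ihg⟩ := ih (by omega)
    have hcast : ((b + 1 : Nat) : Int) = ((b : Nat) : Int) + 1 := by push_cast; ring
    have hsplit : PySem.List.pyRange 0 ((b : Nat) : Int) 1 ++ [((b : Nat) : Int)] =
        PySem.List.pyRange 0 (((b : Nat) : Int) + 1) 1 :=
      (PySem.List.pyRange_one_succ_right (by omega : (0:Int) ≤ ((b : Nat) : Int))).symm
    rw [hcast, ← hsplit, List.foldl_append]
    set fb := (PySem.List.pyRange 0 (b : Int) 1).foldl (fun row' c =>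
      if pvAget C.grid r c = 0 ∧ pvVget vis r c = false
      then PySem.List.pySetD row' c 4 else row') row with hfb
    simp only [List.foldl_cons, List.foldl_nil]
    by_cases hcond : pvAget C.grid r ((b : Nat) : Int) = 0 ∧ pvVget vis r ((b : Nat) : Int) = false
    · rw [if_pos hcond]
      rw [PySem.List.pySetD_of_nonneg _ _ (by omega : (0:Int) ≤ ((b : Nat) : Int))]
      constructor
      · rw [List.length_set]
        exact ihl
      · intro j hj
        by_cases hjb : j = b
        · subst hjb
          have hv : ((j : Nat) : Int).toNat = j := by omega
          rw [hv]
          rw [List.getD_eq_getElem _ _ (by rw [List.length_set, ihl]; exact hj)]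
          rw [List.getElem_set_self (by rw [List.length_set, ihl]; exact hj)]
          rw [if_pos ⟨by omega, hcond.1, hcond.2⟩]
        · have hne : ((b : Nat) : Int).toNat ≠ j := by omega
          rw [List.getD_eq_getElem?_getD, List.getElem?_set_ne hne, ← List.getD_eq_getElem?_getD]
          rw [ihg j hj]
          refine if_congr ?_ rfl rfl
          constructor
          · rintro ⟨h1, h2⟩
            exact ⟨by omega, h2⟩
          · rintro ⟨h1, h2⟩
            exact ⟨by omega, h2⟩
    · rw [if_neg hcond]
      refine ⟨ihl, fun j hj => ?_⟩
      rw [ihg j hj]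
      refine if_congr ?_ rfl rfl
      constructor
      · rintro ⟨h1, h2⟩
        exact ⟨by omega, h2⟩
      · rintro ⟨h1, h2, h3⟩
        refine ⟨?_, h2, h3⟩
        by_cases hjb : j = b
        · subst hjb
          exact absurd ⟨h2, h3⟩ hcond
        · omega

lemma outer_aux (C : pvCtx) (vis : List (List Bool)) :
    ∀ b : Nat, b ≤ C.grid.length →
      ((PySem.List.pyRange 0 (b : Int) 1).foldl (fun out r =>
        (PySem.List.pyRange 0 C.w 1).foldl (fun out c =>
          if pvAget C.grid r c = 0 ∧ pvVget vis r c = false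
          then PySem.List.pySetD out r (PySem.List.pySetD (PySem.List.pyGetD out r []) c 4)
          else out) out) (C.grid.map (fun row => row))).length = C.grid.length ∧
      ∀ i : Nat, i < C.grid.length →
        ((PySem.List.pyRange 0 (b : Int) 1).foldl (fun out r =>
          (PySem.List.pyRange 0 C.w 1).foldl (fun out c =>
            if pvAget C.grid r c = 0 ∧ pvVget vis r c = false
            then PySem.List.pySetD out r (PySem.List.pySetD (PySem.List.pyGetD out r []) c 4)
            else out) out) (C.grid.map (fun row => row))).getD i [] =
        if i < b then pvRowT C vis (i : Int) (C.grid.getD i []) else C.grid.getD i [] := by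
  intro b
  induction b with
  | zero =>
    intro _
    rw [PySem.List.pyRange_one_eq_nil (by omega : ((0:Nat) : Int) ≤ 0)]
    constructor
    · simp
    · intro i hi
      rw [if_neg (by omega)]
      simp [List.map_id']
  | succ b ih =>
    intro hb
    obtain ⟨ihl, ihg⟩ := ih (by omega)
    have hcast : ((b + 1 : Nat) : Int) = ((b : Nat) : Int) + 1 := by push_cast; ring
    have hsplit : PySem.List.pyRange 0 ((b : Nat) : Int) 1 ++ [((b : Nat) : Int)] =
        PySem.List.pyRange 0 (((b : Nat) : Int) + 1) 1 :=
      (PySem.List.pyRange_one_succ_right (by omega : (0:Int) ≤ ((b : Nat) : Int))).symm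
    rw [hcast, ← hsplit, List.foldl_append]
    set ob := (PySem.List.pyRange 0 (b : Int) 1).foldl (fun out r =>
      (PySem.List.pyRange 0 C.w 1).foldl (fun out c =>
        if pvAget C.grid r c = 0 ∧ pvVget vis r c = false
        then PySem.List.pySetD out r (PySem.List.pySetD (PySem.List.pyGetD out r []) c 4)
        else out) out) (C.grid.map (fun row => row)) with hob
    simp only [List.foldl_cons, List.foldl_nil]
    have hbl : ((b : Nat) : Int).toNat < ob.length := by
      rw [ihl]; omega
    rw [inner_comm C vis _ _ _ (by omega) hbl]
    have hget : PySem.List.pyGetD ob ((b : Nat) : Int) [] = C.grid.getD b [] := by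
      rw [PySem.List.pyGetD_of_nonneg _ _ (by omega : (0:Int) ≤ ((b : Nat) : Int))]
      have hig := ihg b (by omega)
      rw [if_neg (by omega)] at hig
      simpa using hig
    rw [hget]
    constructor
    · rw [PySem.List.pySetD_of_nonneg _ _ (by omega : (0:Int) ≤ ((b : Nat) : Int))]
      rw [List.length_set]
      exact ihl
    · intro i hi
      rw [PySem.List.pySetD_of_nonneg _ _ (by omega : (0:Int) ≤ ((b : Nat) : Int))]
      by_cases hib : i = b
      · subst hib
        have hv : ((i : Nat) : Int).toNat = i := by omega
        rw [hv]
        rw [List.getD_eq_getElem _ _ (by rw [List.length_set, ihl]; omega)]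
        rw [List.getElem_set_self (by rw [List.length_set, ihl]; omega)]
        rw [if_pos (by omega)]
        rfl
      · have hne : ((b : Nat) : Int).toNat ≠ i := by omega
        rw [List.getD_eq_getElem?_getD, List.getElem?_set_ne hne, ← List.getD_eq_getElem?_getD]
        rw [ihg i hi]
        by_cases hlt : i < b
        · rw [if_pos hlt, if_pos (by omega)]
        · rw [if_neg hlt, if_neg (by omega)]

lemma aget_eq (C : pvCtx) {i j : Nat} (hi : i < C.grid.length)
    (hj : j < (C.grid.getD i []).length) :
    pvAget C.grid (i : Int) (j : Int) = (C.grid.getD i []).getD j 0 := by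
  rw [pvAget, PySem.List.pyGetD_of_nonneg _ _ (by omega : (0:Int) ≤ ((i : Nat) : Int)),
    PySem.List.pyGetD_of_nonneg _ _ (by omega : (0:Int) ≤ ((j : Nat) : Int))]
  have h1 : ((i : Nat) : Int).toNat = i := by omega
  have h2 : ((j : Nat) : Int).toNat = j := by omega
  rw [h1, h2]

-- ---------- final assembly ----------

lemma finalA_facts (C : pvCtx) (vis : List (List Bool)) :
    (pvFinalA C.grid C.h C.w vis).length = C.grid.length ∧
    ∀ i : Nat, i < C.grid.length →
      (pvFinalA C.grid C.h C.w vis).getD i [] = pvRowT C vis (i : Int) (C.grid.getD i []) := by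
  obtain ⟨h1, h2⟩ := outer_aux C vis C.grid.length (le_refl _)
  refine ⟨h1, fun i hi => ?_⟩
  have h3 := h2 i hi
  rw [if_pos hi] at h3
  exact h3

lemma rowT_facts (C : pvCtx) (vis : List (List Bool)) (r : Int) (row : List Int)
    (hrow : (C.grid.headD []).length ≤ row.length) :
    (pvRowT C vis r row).length = row.length ∧
    ∀ j : Nat, j < row.length →
      (pvRowT C vis r row).getD j 0 =
      if (j : Int) < C.w ∧ pvAget C.grid r (j : Int) = 0 ∧ pvVget vis r (j : Int) = false
      then 4 else row.getD j 0 := by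
  exact rowT_aux C vis r row hrow (C.grid.headD []).length (le_refl _)

lemma alt_facts (C : pvCtx) :
    (transform_alt C.grid).length = C.grid.length ∧
    ∀ i : Nat, i < C.grid.length →
      ((transform_alt C.grid).getD i []).length = (C.grid.getD i []).length ∧
      ∀ j : Nat, j < (C.grid.getD i []).length →
        ((transform_alt C.grid).getD i []).getD j 0 =
        if (j : Int) < C.w ∧ (C.grid.getD i []).getD j 0 = 0 ∧
            ¬(((i : Int), (j : Int)) ∈ pvW C)
        then 4 else (C.grid.getD i []).getD j 0 := by
  have hguard : ¬(C.grid = [] ∨ C.grid.headD [] = []) := by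
    rintro (h | h)
    · exact C.hne h
    · exact C.hne0 h
  have halt : transform_alt C.grid = (PySem.List.enumerate C.grid).map (fun p =>
      (PySem.List.enumerate p.2).map (fun q =>
        if q.1 < C.w ∧ q.2 = 0 ∧ ¬((p.1, q.1) ∈ pvW C) then (4 : Int) else q.2)) := by
    rw [transform_alt, if_neg hguard]
    rfl
  rw [halt]
  have hlen : ((PySem.List.enumerate C.grid).map (fun p =>
      (PySem.List.enumerate p.2).map (fun q =>
        if q.1 < C.w ∧ q.2 = 0 ∧ ¬((p.1, q.1) ∈ pvW C) then (4 : Int) else q.2))).length =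
      C.grid.length := by
    simp [PySem.List.length_enumerate]
  refine ⟨hlen, fun i hi => ?_⟩
  have hie : i < (PySem.List.enumerate C.grid).length := by
    rw [PySem.List.length_enumerate]; exact hi
  have hrowi : (PySem.List.enumerate C.grid)[i] = ((i : Int), C.grid[i]) := by
    rw [PySem.List.getElem_enumerate]
    simp
  have hrowD : ((PySem.List.enumerate C.grid).map (fun p =>
      (PySem.List.enumerate p.2).map (fun q =>
        if q.1 < C.w ∧ q.2 = 0 ∧ ¬((p.1, q.1) ∈ pvW C) then (4 : Int) else q.2))).getD i [] =
      (PySem.List.enumerate C.grid[i]).map (fun q =>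
        if q.1 < C.w ∧ q.2 = 0 ∧ ¬((((i : Int), C.grid[i]).1, q.1) ∈ pvW C)
        then (4 : Int) else q.2) := by
    rw [List.getD_eq_getElem _ _ (by rw [List.length_map]; exact hie)]
    rw [List.getElem_map, hrowi]
  rw [hrowD]
  have hgridD : C.grid.getD i [] = C.grid[i] := List.getD_eq_getElem _ _ hi
  constructor
  · rw [hgridD]
    simp [PySem.List.length_enumerate]
  · intro j hj
    rw [hgridD] at hj ⊢
    have hje : j < (PySem.List.enumerate C.grid[i]).length := by
      rw [PySem.List.length_enumerate]; exact hj
    rw [List.getD_eq_getElem _ _ (by rw [List.length_map]; exact hje)]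
    rw [List.getElem_map, PySem.List.getElem_enumerate]
    rw [List.getD_eq_getElem _ _ hj]
    simp only [zero_add]

theorem transform_eq_alt (grid : List (List Int)) (hpre : Pre_transform grid) :
    transform grid = transform_alt grid := by
  by_cases hguard : grid = [] ∨ grid.headD [] = []
  · rw [transform, transform_alt, if_pos hguard, if_pos hguard]
  · have hne : grid ≠ [] := fun h => hguard (Or.inl h)
    have hne0 : grid.headD [] ≠ [] := fun h => hguard (Or.inr h)
    have hpre' : ∀ row ∈ grid, (grid.headD []).length ≤ row.length := hpre
    set C : pvCtx := ⟨grid, hpre', hne, hne0⟩ with hC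
    have hA : transform grid = pvFinalA C.grid C.h C.w (pvF C) := by
      rw [transform, if_neg hguard]
      rfl
    rw [hA]
    obtain ⟨hAL, hAE⟩ := finalA_facts C (pvF C)
    obtain ⟨hBL, hBE⟩ := alt_facts C
    apply List.ext_getElem
    · rw [hAL]
      rw [hBL]
    · intro i h1 h2
      have hi : i < C.grid.length := by
        rw [hAL] at h1; exact h1
      have hrlen : (C.grid.headD []).length ≤ (C.grid.getD i []).length :=
        C.hrows _ (by rw [List.getD_eq_getElem _ _ hi]; exact List.getElem_mem _)
      obtain ⟨hRL, hRE⟩ := rowT_facts C (pvF C) (i : Int) (C.grid.getD i []) hrlen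
      obtain ⟨hBL2, hBE2⟩ := hBE i hi
      have eA : (pvFinalA C.grid C.h C.w (pvF C))[i] =
          pvRowT C (pvF C) (i : Int) (C.grid.getD i []) := by
        rw [← List.getD_eq_getElem _ ([] : List Int) h1]
        exact hAE i hi
      have eB : (transform_alt C.grid)[i] = (transform_alt C.grid).getD i [] :=
        (List.getD_eq_getElem _ _ h2).symm
      rw [eA, eB]
      apply List.ext_getElem
      · rw [hRL, hBL2]
      · intro j hj1 hj2
        have hj : j < (C.grid.getD i []).length := by
          rw [hRL] at hj1; exact hj1
        have eA2 : (pvRowT C (pvF C) (i : Int) (C.grid.getD i []))[j] =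
            (pvRowT C (pvF C) (i : Int) (C.grid.getD i [])).getD j 0 :=
          (List.getD_eq_getElem _ _ hj1).symm
        have eB2 : ((transform_alt C.grid).getD i [])[j] =
            ((transform_alt C.grid).getD i []).getD j 0 :=
          (List.getD_eq_getElem _ _ hj2).symm
        rw [eA2, eB2, hRE j hj, hBE2 j hj]
        by_cases hjw : (j : Int) < C.w
        · have hin : C.InR ((i : Int), (j : Int)) := by
            refine ⟨by omega, ?_, by omega, hjw⟩
            unfold pvCtx.h
            omega
          have haeq : pvAget C.grid (i : Int) (j : Int) = (C.grid.getD i []).getD j 0 :=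
            aget_eq C hi hj
          refine if_congr ?_ rfl rfl
          constructor
          · rintro ⟨x1, x2, x3⟩
            refine ⟨x1, by rw [← haeq]; exact x2, ?_⟩
            intro hmem
            rw [(F_iff_W C hin).mpr hmem] at x3
            exact absurd x3 (by simp)
          · rintro ⟨x1, x2, x3⟩
            refine ⟨x1, by rw [haeq]; exact x2, ?_⟩
            by_cases hb : pvVget (pvF C) (i : Int) (j : Int) = true
            · exact absurd ((F_iff_W C hin).mp hb) x3
            · simpa using hb
        · rw [if_neg (by rintro ⟨x1, _⟩; exact hjw x1),
            if_neg (by rintro ⟨x1, _⟩; exact hjw x1)]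


-- ===== VERDICT (by name: the statement is the Claim_ definition above) =====
theorem transform_spec : Claim_equal_transform := by
  intro grid hdom hpre
  unfold Spec_transform
  exact transform_eq_alt grid hpre
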